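-- pv_equiv track=rewrite | github.com/AsierReig/EEG_control_ROSNeuro | my_hero_bci/nodes/train_model.py | select_channel_indices
-- ===== SOURCE A (Python) =====
-- def select_channel_indices(ch_labels, wanted):
--     # Intenta detectar por substring si no coincide exactamente
--     idx = []
--     for w in wanted:
--         found = False
--         for i, ch in enumerate(ch_labels):
--             if w.lower() in ch.lower():
--                 idx.append(i)
--                 found = True
--                 break
--         if not found:
--             # buscar por exact match
--             for i, ch in enumerate(ch_labels):
--                 if ch == w:
--                     idx.append(i)
--                     found = True
--                     break
--     return sorted(list(set(idx)))
-- ===== SOURCE B (Python) =====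
-- def select_channel_indices(ch_labels, wanted):
--     # Channel-major single pass: walk the channels once in index order, keeping
--     # the still-unmatched wanted labels (lowercased); a channel index is emitted
--     # iff it is the first substring match of some wanted label, so the output is
--     # produced already sorted and duplicate-free (no set/sort at the end).  The
--     # original's exact-match fallback is unreachable: ch == w implies
--     # w.lower() in ch.lower().
--     remaining = [w.lower() for w in wanted]
--     out = []
--     for i, ch in enumerate(ch_labels):
--         if not remaining:
--             break
--         cl = ch.lower()
--         if any(w in cl for w in remaining):
--             out.append(i)
--             remaining = [w for w in remaining if w not in cl]
--     return out
-- ===== Notes on version B (the rewrite author's own statement) =====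
-- stated objective: alternative
-- what changed: B inverts the traversal: instead of scanning the channel list once per wanted label (plus A's unreachable exact-match fallback pass) and then sorting the dedup'd indices, B walks the channel list ONCE, keeps the set of still-unmatched lowercased wanted labels, and emits each index at the moment it is the first match of some remaining label, so the result is built already sorted and duplicate-free with no final sorted(set(...)) step.
import Mathlib
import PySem

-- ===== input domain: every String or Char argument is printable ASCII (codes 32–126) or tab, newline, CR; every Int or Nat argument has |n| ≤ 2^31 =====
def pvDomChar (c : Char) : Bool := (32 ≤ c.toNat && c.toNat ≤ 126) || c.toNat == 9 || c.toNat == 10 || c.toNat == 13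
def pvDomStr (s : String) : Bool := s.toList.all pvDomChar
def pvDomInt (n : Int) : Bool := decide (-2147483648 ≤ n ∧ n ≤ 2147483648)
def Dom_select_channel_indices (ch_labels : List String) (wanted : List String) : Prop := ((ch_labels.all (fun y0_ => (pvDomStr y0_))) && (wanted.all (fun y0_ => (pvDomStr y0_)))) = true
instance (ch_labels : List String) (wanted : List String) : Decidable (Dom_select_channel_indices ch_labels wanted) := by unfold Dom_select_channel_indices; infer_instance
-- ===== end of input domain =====

-- B inverts the traversal: one channel-major pass emitting each index the moment it is the
-- first match of a still-unmatched wanted label, so the output is built already sorted and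
-- deduplicated, with no final sorted(set(...)) and without A's unreachable exact-match pass.

-- ===== PORT A =====
-- inner loop 1: first i with w.lower() in ch.lower() (break on first hit)
def pvFindSubA (pairs : List (Int × String)) (w : String) : Option Int :=
  match pairs with
  | [] => none
  | (i, ch) :: rest =>
      if PySem.Str.isIn (PySem.Str.lower w) (PySem.Str.lower ch) then some i
      else pvFindSubA rest w

-- inner loop 2 (fallback): first i with ch == w
def pvFindExactA (pairs : List (Int × String)) (w : String) : Option Int :=
  match pairs with
  | [] => none
  | (i, ch) :: rest => if ch == w then some i else pvFindExactA rest w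

def select_channel_indices (ch_labels : List String) (wanted : List String) : List Int :=
  let idx : List Int := wanted.foldl (fun idx w =>
    match pvFindSubA (PySem.List.enumerate ch_labels) w with
    | some i => idx ++ [i]          -- found = True via substring
    | none =>
        match pvFindExactA (PySem.List.enumerate ch_labels) w with
        | some i => idx ++ [i]      -- found via exact match
        | none => idx) []
  PySem.List.sorted (PySem.Set.ofList idx) (fun x => x) false

-- ===== PORT B =====
-- the 'for i, ch in enumerate(ch_labels)' loop of Source B, with its break and the
-- remaining-labels filtering; n is the running index
def pvScanB (ws : List String) (chs : List String) (n : Int) : List Int :=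
  match chs with
  | [] => []
  | ch :: rest =>
      if ws.isEmpty then []        -- 'if not remaining: break'
      else
        let cl := PySem.Str.lower ch
        if ws.any (fun w => PySem.Str.isIn w cl) then
          n :: pvScanB (ws.filter (fun w => !PySem.Str.isIn w cl)) rest (n + 1)
        else
          pvScanB ws rest (n + 1)

def select_channel_indices_alt (ch_labels : List String) (wanted : List String) : List Int :=
  pvScanB (wanted.map PySem.Str.lower) ch_labels 0

-- ===== PRECONDITION & SPEC =====
def Spec_select_channel_indices (ch_labels : List String) (wanted : List String) (out : List Int) : Prop := out = select_channel_indices_alt ch_labels wanted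
instance (ch_labels : List String) (wanted : List String) (out : List Int) : Decidable (Spec_select_channel_indices ch_labels wanted out) := by unfold Spec_select_channel_indices; infer_instance

-- ===== CLAIM (what is proved, stated in full; the proofs are below) =====
def Claim_equal_select_channel_indices : Prop := ∀ (ch_labels : List String) (wanted : List String), Dom_select_channel_indices ch_labels wanted → Spec_select_channel_indices ch_labels wanted (select_channel_indices ch_labels wanted)

-- ===== LEMMAS AND PROOFS =====

-- first-match index of an (already lowercased) label over chs with indices starting at n:
-- the common characterisation of A's inner scan and of what B emits
def pvFFirst (chs : List String) (n : Int) (wl : String) : Option Int :=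
  match chs with
  | [] => none
  | ch :: rest =>
      if PySem.Str.isIn wl (PySem.Str.lower ch) then some n else pvFFirst rest (n + 1) wl

-- any string is a substring of itself
theorem isIn_self (s : String) : PySem.Str.isIn s s = true := by
  rw [PySem.Str.isIn_iff_infix]

-- if the substring scan finds nothing, the exact-match fallback finds nothing either
theorem fallback_none (pairs : List (Int × String)) (w : String)
    (h : pvFindSubA pairs w = none) : pvFindExactA pairs w = none := by
  induction pairs with
  | nil => rfl
  | cons p rest ih =>
      obtain ⟨i, ch⟩ := p
      simp only [pvFindSubA] at h
      split at h
      · exact absurd h (by simp)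
      · next hc =>
          simp only [pvFindExactA]
          have hne : (ch == w) = false := by
            rw [beq_eq_false_iff_ne]
            rintro rfl
            exact hc (isIn_self _)
          rw [hne]
          simp only [Bool.false_eq_true, if_false]
          exact ih h

-- A's accumulator fold is the filterMap of the substring scan
theorem aFold_eq (ch_labels : List String) (wanted : List String) (acc : List Int) :
    wanted.foldl (fun idx w =>
      match pvFindSubA (PySem.List.enumerate ch_labels) w with
      | some i => idx ++ [i]
      | none =>
          match pvFindExactA (PySem.List.enumerate ch_labels) w with
          | some i => idx ++ [i]
          | none => idx) acc
    = acc ++ wanted.filterMap (fun w => pvFindSubA (PySem.List.enumerate ch_labels) w) := by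
  induction wanted generalizing acc with
  | nil => simp
  | cons w rest ih =>
      simp only [List.foldl_cons, List.filterMap_cons]
      cases hf : pvFindSubA (PySem.List.enumerate ch_labels) w with
      | some i => simp [ih]
      | none => simp [fallback_none _ _ hf, ih]

-- A's inner scan over enumerate is pvFFirst of the lowercased label
theorem findSubA_eq_ffirst (chs : List String) (n : Int) (w : String) :
    pvFindSubA (PySem.List.enumerate chs n) w = pvFFirst chs n (PySem.Str.lower w) := by
  induction chs generalizing n with
  | nil => rfl
  | cons ch rest ih =>
      rw [PySem.List.enumerate_cons]
      simp only [pvFindSubA, pvFFirst, ih]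

-- every index B emits is ≥ the running counter
theorem pvScanB_lb (ws chs : List String) (n : Int) :
    ∀ x ∈ pvScanB ws chs n, n ≤ x := by
  induction chs generalizing ws n with
  | nil => intro x hx; simp [pvScanB] at hx
  | cons ch rest ih =>
      intro x hx
      simp only [pvScanB] at hx
      split at hx
      · simp at hx
      · split at hx
        · rcases List.mem_cons.mp hx with h | h
          · omega
          · have := ih _ _ _ h; omega
        · have := ih _ _ _ hx; omega

-- B's output is strictly increasing
theorem pvScanB_pairwise (ws chs : List String) (n : Int) :
    (pvScanB ws chs n).Pairwise (· < ·) := by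
  induction chs generalizing ws n with
  | nil => simp [pvScanB]
  | cons ch rest ih =>
      simp only [pvScanB]
      split
      · simp
      · split
        · exact List.pairwise_cons.mpr
            ⟨fun x hx => by have := pvScanB_lb _ _ _ x hx; omega, ih _ _⟩
        · exact ih _ _

-- membership in B's output = being the first-match index of some remaining label
theorem pvScanB_mem (ws chs : List String) (n : Int) (x : Int) :
    x ∈ pvScanB ws chs n ↔ ∃ w ∈ ws, pvFFirst chs n w = some x := by
  induction chs generalizing ws n with
  | nil => simp [pvScanB, pvFFirst]
  | cons ch rest ih =>
      simp only [pvScanB, pvFFirst]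
      split
      · next he =>
          simp [List.isEmpty_iff.mp he]
      · next he =>
          split
          · next hany =>
              rcases List.any_eq_true.mp hany with ⟨w0, hw0, hm0⟩
              simp only [List.mem_cons, ih]
              constructor
              · rintro (rfl | ⟨w, hw, hf⟩)
                · exact ⟨w0, hw0, by rw [if_pos hm0]⟩
                · have hw' := List.mem_filter.mp hw
                  have hmf : PySem.Str.isIn w (PySem.Str.lower ch) = false :=
                    by simpa using hw'.2
                  exact ⟨w, hw'.1, by rw [if_neg (Bool.eq_false_iff.mp hmf)]; exact hf⟩
              · rintro ⟨w, hw, hf⟩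
                by_cases hm : PySem.Str.isIn w (PySem.Str.lower ch) = true
                · rw [if_pos hm] at hf
                  exact Or.inl (Option.some_inj.mp hf).symm
                · rw [if_neg hm] at hf
                  exact Or.inr ⟨w,
                    List.mem_filter.mpr ⟨hw, by simpa using Bool.eq_false_iff.mpr hm⟩, hf⟩
          · next hany =>
              rw [ih]
              have hall : ∀ w ∈ ws, ¬ PySem.Str.isIn w (PySem.Str.lower ch) = true := by
                intro w hw hc
                exact hany (List.any_eq_true.mpr ⟨w, hw, hc⟩)
              constructor
              · rintro ⟨w, hw, hf⟩; exact ⟨w, hw, by rw [if_neg (hall w hw)]; exact hf⟩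
              · rintro ⟨w, hw, hf⟩; rw [if_neg (hall w hw)] at hf; exact ⟨w, hw, hf⟩

-- the core identity: sorting the deduplicated first-match indices IS B's single pass
theorem sorted_ofList_eq_scan (ws chs : List String) (n : Int) :
    PySem.List.sorted (PySem.Set.ofList (ws.filterMap (pvFFirst chs n))) (fun x => x) false
      = pvScanB ws chs n := by
  apply PySem.List.sorted_eq_of_perm_of_pairwise_lt
  · rw [List.perm_ext_iff_of_nodup]
    · intro x
      rw [pvScanB_mem, PySem.Set.mem_ofList, List.mem_filterMap]
    · exact (pvScanB_pairwise ws chs n).imp ne_of_lt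
    · exact PySem.Set.nodup_ofList _
  · exact pvScanB_pairwise ws chs n

-- ===== VERDICT (by name: the statement is the Claim_ definition above) =====
theorem select_channel_indices_spec : Claim_equal_select_channel_indices := by
  intro ch_labels wanted _
  unfold Spec_select_channel_indices select_channel_indices select_channel_indices_alt
  rw [aFold_eq, List.nil_append]
  simp only [findSubA_eq_ffirst]
  rw [← sorted_ofList_eq_scan]
  simp [List.filterMap_map, Function.comp]
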